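-- pv_equiv track=rewrite | github.com/liuzhanhao/Yelp-Score-Prediction-Discrepancy-detection | task3/feature_analysis.py | get_sentences_without_markers_from_review
-- ===== SOURCE A (Python) =====
-- def get_sentences_without_markers_from_review(review):
--     r1 = [x for x in review.split('.') if len(x) > 0]
--     r2 = []
--     for i in r1:
--         t1 = [y for y in i.split('?') if len(y) > 0]
--         for j in t1:
--             r2.append(j)
--     r3 = []
--     for k in r2:
--         t2 = [z for z in k.split('!') if len(z) > 0]
--         for l in t2:
--             r3.append(l)
--     return r3
-- ===== SOURCE B (Python) =====
-- def get_sentences_without_markers_from_review(review):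
--     sentences = []
--     cur = ''
--     for ch in review:
--         if ch in '.?!':
--             if cur:
--                 sentences.append(cur)
--             cur = ''
--         else:
--             cur += ch
--     if cur:
--         sentences.append(cur)
--     return sentences
-- ===== Notes on version B (the rewrite author's own statement) =====
-- stated objective: simpler
-- what changed: Replaced three successive split-filter-append passes (one per delimiter) by a single character-level pass with a current-token buffer that flushes non-empty tokens at each of '.', '?', '!'.
import Mathlib
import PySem

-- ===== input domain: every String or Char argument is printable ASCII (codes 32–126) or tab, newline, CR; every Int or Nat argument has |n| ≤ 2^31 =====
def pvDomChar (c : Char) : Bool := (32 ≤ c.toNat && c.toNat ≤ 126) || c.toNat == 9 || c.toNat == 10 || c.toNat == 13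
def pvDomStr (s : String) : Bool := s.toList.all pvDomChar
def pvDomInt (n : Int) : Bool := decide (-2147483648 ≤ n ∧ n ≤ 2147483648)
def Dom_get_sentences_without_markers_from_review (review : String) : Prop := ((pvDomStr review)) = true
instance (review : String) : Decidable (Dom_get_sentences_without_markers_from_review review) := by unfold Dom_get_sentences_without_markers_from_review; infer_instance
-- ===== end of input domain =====

-- B replaces A's three split-filter-append passes by one character pass with a token buffer (simpler; same O(n) cost).

-- ===== PORT A =====
def get_sentences_without_markers_from_review (review : String) : List String :=
  let r1 := ((PySem.Str.split? review ".").getD []).filter (fun x => decide (0 < PySem.Str.len x))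
  let r2 := r1.foldl (fun r2 i =>
      ((((PySem.Str.split? i "?").getD []).filter (fun y => decide (0 < PySem.Str.len y))).foldl
        (fun r2 j => r2 ++ [j]) r2)) []
  let r3 := r2.foldl (fun r3 k =>
      ((((PySem.Str.split? k "!").getD []).filter (fun z => decide (0 < PySem.Str.len z))).foldl
        (fun r3 l => r3 ++ [l]) r3)) []
  r3

-- ===== PORT B =====
def get_sentences_without_markers_from_review_alt (review : String) : List String :=
  let st := review.toList.foldl
    (fun (st : List (List Char) × List Char) ch =>
      if ch == '.' || ch == '?' || ch == '!' then
        (if st.2.isEmpty then st.1 else st.1 ++ [st.2], [])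
      else (st.1, st.2 ++ [ch]))
    ([], [])
  (if st.2.isEmpty then st.1 else st.1 ++ [st.2]).map String.ofList

-- ===== PRECONDITION & SPEC =====
def Spec_get_sentences_without_markers_from_review (review : String) (out : List String) : Prop := out = get_sentences_without_markers_from_review_alt review
instance (review : String) (out : List String) : Decidable (Spec_get_sentences_without_markers_from_review review out) := by unfold Spec_get_sentences_without_markers_from_review; infer_instance

-- ===== CLAIM (what is proved, stated in full; the proofs are below) =====
def Claim_equal_get_sentences_without_markers_from_review : Prop := ∀ (review : String), Dom_get_sentences_without_markers_from_review review → Spec_get_sentences_without_markers_from_review review (get_sentences_without_markers_from_review review)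

-- ===== LEMMAS AND PROOFS =====

-- split on a single delimiter, keeping empty pieces (characterises PySem.Chars.splitOn for a one-char separator)
def pvRaw (c : Char) (l : List Char) (cur : List Char) : List (List Char) :=
  match l with
  | [] => [cur]
  | d :: ds => if c == d then cur :: pvRaw c ds [] else pvRaw c ds (cur ++ [d])

-- tokeniser: split on chars satisfying p, dropping empty tokens; buf is the pending token
def pvTok (p : Char → Bool) (buf : List Char) (l : List Char) : List (List Char) :=
  match l with
  | [] => if buf.isEmpty then [] else [buf]
  | c :: cs => if p c then (if buf.isEmpty then pvTok p [] cs else buf :: pvTok p [] cs)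
               else pvTok p (buf ++ [c]) cs

theorem pv_go_eq_raw (c : Char) : ∀ (fuel : Nat) (l cur : List Char) (acc : List (List Char)),
    l.length ≤ fuel →
    PySem.Chars.splitOn.go [c] fuel l cur acc = acc.reverse ++ pvRaw c l cur.reverse := by
  intro fuel
  induction fuel with
  | zero =>
    intro l cur acc h
    have : l = [] := by cases l <;> simp_all
    subst this
    rw [PySem.Chars.splitOn.go.eq_def]
    simp [pvRaw]
  | succ n ih =>
    intro l cur acc h
    cases l with
    | nil =>
      rw [PySem.Chars.splitOn.go.eq_def]
      simp [pvRaw]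
    | cons d ds =>
      rw [PySem.Chars.splitOn.go.eq_def]
      simp only [List.isPrefixOf, List.isPrefixOf_nil_left, Bool.and_true]
      by_cases hc : c == d
      · simp only [hc, if_pos, pvRaw, List.length_cons, List.length_nil, List.drop_succ_cons,
          List.drop_zero]
        rw [ih ds [] (cur.reverse :: acc) (by simpa using h)]
        simp
      · simp only [hc, pvRaw]
        rw [ih ds (d :: cur) acc (by simpa using h)]
        simp [hc]

theorem pv_splitOn_eq_raw (c : Char) (l : List Char) :
    PySem.Chars.splitOn l [c] = pvRaw c l [] := by
  unfold PySem.Chars.splitOn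
  rw [pv_go_eq_raw c (l.length + 1) l [] [] (by omega)]
  simp

theorem pv_filter_raw (c : Char) : ∀ (l cur : List Char),
    (pvRaw c l cur).filter (fun x => decide (0 < x.length)) = pvTok (fun d => c == d) cur l := by
  intro l
  induction l with
  | nil =>
    intro cur
    cases cur <;> simp [pvRaw, pvTok]
  | cons d ds ih =>
    intro cur
    by_cases hc : c == d
    · simp only [pvRaw, pvTok, hc, if_pos]
      cases cur <;> simp [List.filter, ih]
    · simp only [pvRaw, pvTok, hc]
      simp [ih]

-- fusing two tokeniser passes into one pass on the union of the delimiters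
theorem pv_tok_fuse (p q : Char → Bool) : ∀ (cs buf : List Char) (done : List (List Char)) (pend : List Char),
    (∀ rest, pvTok q [] (buf ++ rest) = done ++ pvTok q pend rest) →
    (pvTok p buf cs).flatMap (pvTok q []) = done ++ pvTok (fun c => p c || q c) pend cs := by
  intro cs
  induction cs with
  | nil =>
    intro buf done pend H
    have h0 := H []
    rw [List.append_nil] at h0
    cases hb : buf.isEmpty
    · simp only [pvTok, hb, Bool.false_eq_true, if_neg, not_false_iff, List.flatMap_cons,
        List.flatMap_nil, List.append_nil]
      rw [h0]
      simp [pvTok]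
    · have hbuf : buf = [] := by simpa using hb
      subst hbuf
      simp only [pvTok] at h0
      simp only [pvTok, List.isEmpty_nil, if_pos, List.flatMap_nil]
      exact h0
  | cons c cs ih =>
    intro buf done pend H
    by_cases hp : p c
    · -- delimiter of the outer pass
      have hIH := ih [] [] [] (fun rest => by simp)
      rw [List.nil_append] at hIH
      cases hb : buf.isEmpty
      · -- non-empty outer buffer: A flushes it; its q-tokens are done ++ pend
        simp only [pvTok, hp, hb, Bool.false_eq_true, if_pos, if_neg, not_false_iff,
          List.flatMap_cons]
        rw [hIH]
        have h0 := H []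
        rw [List.append_nil] at h0
        rw [h0]
        simp only [pvTok, hp, Bool.true_or, if_pos]
        cases hpe : pend.isEmpty <;> simp [pvTok, hpe]
      · have hbuf : buf = [] := by simpa using hb
        subst hbuf
        have h0 := H []
        rw [List.append_nil] at h0
        simp only [pvTok] at h0
        rcases List.append_eq_nil_iff.mp h0.symm with ⟨hd, hrest⟩
        subst hd
        have hpe : pend.isEmpty = true := by
          cases h' : pend.isEmpty
          · rw [h'] at hrest; simp at hrest
          · rfl
        simp only [pvTok, hp, hpe, List.isEmpty_nil, if_pos, Bool.true_or]
        rw [hIH]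
        simp
    · -- ordinary character: it joins the pending token of both passes
      by_cases hq : q c
      · have H' : ∀ rest, pvTok q [] ((buf ++ [c]) ++ rest)
            = (done ++ if pend.isEmpty then [] else [pend]) ++ pvTok q [] rest := by
          intro rest
          rw [List.append_assoc, List.singleton_append, H (c :: rest)]
          simp only [pvTok, hq, if_pos]
          cases hpe : pend.isEmpty <;> simp [hpe]
        have hfin := ih (buf ++ [c]) (done ++ if pend.isEmpty then [] else [pend]) [] H'
        simp only [pvTok, hp, hq, Bool.or_eq_true, or_true, false_or, Bool.false_eq_true,
          if_neg, if_pos, not_false_iff] at hfin ⊢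
        rw [hfin]
        cases hpe : pend.isEmpty <;> simp [hpe]
      · have H' : ∀ rest, pvTok q [] ((buf ++ [c]) ++ rest) = done ++ pvTok q (pend ++ [c]) rest := by
          intro rest
          rw [List.append_assoc, List.singleton_append, H (c :: rest)]
          simp [pvTok, hq]
        have hfin := ih (buf ++ [c]) done (pend ++ [c]) H'
        simp only [pvTok, hp, hq, Bool.or_eq_true, or_self, false_or, Bool.false_eq_true,
          if_neg, not_false_iff] at hfin ⊢
        exact hfin

theorem pv_fold_snoc {α : Type} : ∀ (l acc : List α), l.foldl (fun a j => a ++ [j]) acc = acc ++ l := by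
  intro l
  induction l with
  | nil => simp
  | cons x xs ih => intro acc; simp [List.foldl_cons, ih, List.append_assoc]

-- single-delimiter pass at the String level, as A computes it
theorem pv_pass (sep : Char) (s : String) :
    ((PySem.Str.split? s (String.ofList [sep])).getD []).filter (fun x => decide (0 < PySem.Str.len x))
      = (pvTok (fun d => sep == d) [] s.toList).map String.ofList := by
  have hsep : (String.ofList [sep]).toList = [sep] := by simp
  show (((PySem.Chars.split? s.toList (String.ofList [sep]).toList).map (List.map String.ofList)).getD []).filter _ = _
  rw [hsep]
  simp only [PySem.Chars.split?, List.isEmpty_cons, if_neg, Bool.false_eq_true, not_false_iff,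
    Option.map_some, Option.getD_some]
  rw [pv_splitOn_eq_raw]
  rw [List.filter_map]
  rw [show ((fun x => decide (0 < PySem.Str.len x)) ∘ String.ofList)
        = (fun x : List Char => decide (0 < x.length)) from funext (fun x => by
          simp [Function.comp, PySem.Str.len, PySem.Chars.len])]
  rw [pv_filter_raw]

-- one String-level pass after another fuses into a single pvTok pass
theorem pv_pass_fuse (p q : Char → Bool) (cs : List Char) :
    ((pvTok p [] cs).map String.ofList).flatMap (fun i => (pvTok q [] i.toList).map String.ofList)
      = (pvTok (fun c => p c || q c) [] cs).map String.ofList := by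
  rw [List.flatMap_map]
  simp only [String.toList_ofList]
  rw [← List.map_flatMap]
  rw [pv_tok_fuse p q cs [] [] [] (fun rest => rfl)]
  rw [List.nil_append]

theorem pv_B_fold (pb : Char → Bool) : ∀ (cs : List Char) (res : List (List Char)) (buf : List Char),
    (let st := cs.foldl
      (fun (st : List (List Char) × List Char) ch =>
        if pb ch then (if st.2.isEmpty then st.1 else st.1 ++ [st.2], []) else (st.1, st.2 ++ [ch]))
      (res, buf)
     (if st.2.isEmpty then st.1 else st.1 ++ [st.2]))
    = res ++ pvTok pb buf cs := by
  intro cs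
  induction cs with
  | nil =>
    intro res buf
    simp only [List.foldl_nil, pvTok]
    cases hb : buf.isEmpty <;> simp [hb]
  | cons c cs ih =>
    intro res buf
    simp only [List.foldl_cons]
    by_cases hp : pb c
    · simp only [hp, if_pos, pvTok]
      cases hb : buf.isEmpty
      · simp only [hb, Bool.false_eq_true, if_neg, not_false_iff]
        rw [ih (res ++ [buf]) []]
        simp
      · simp only [hb, if_pos]
        rw [ih res []]
    · simp only [hp, if_neg, Bool.not_eq_true, pvTok]
      rw [ih res (buf ++ [c])]

theorem pv_tok_congr (p q : Char → Bool) (h : ∀ c, p c = q c) :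
    ∀ (l buf : List Char), pvTok p buf l = pvTok q buf l := by
  intro l
  induction l with
  | nil => intro buf; simp [pvTok]
  | cons c cs ih => intro buf; simp only [pvTok, h c]; split_ifs <;> simp [ih]

-- ===== VERDICT (by name: the statement is the Claim_ definition above) =====
theorem get_sentences_without_markers_from_review_spec : Claim_equal_get_sentences_without_markers_from_review := by
  intro review _
  unfold Spec_get_sentences_without_markers_from_review
  unfold get_sentences_without_markers_from_review get_sentences_without_markers_from_review_alt
  simp only []
  rw [pv_B_fold (fun ch => ch == '.' || ch == '?' || ch == '!') review.toList [] []]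
  rw [List.nil_append]
  -- A's three passes, each rewritten with pv_pass and the loop-shape lemmas
  rw [show ("." : String) = String.ofList ['.'] from rfl,
      show ("?" : String) = String.ofList ['?'] from rfl,
      show ("!" : String) = String.ofList ['!'] from rfl]
  rw [pv_pass '.' review]
  have pass2 : ∀ (r : List String),
      r.foldl (fun r2 i =>
          ((((PySem.Str.split? i (String.ofList ['?'])).getD []).filter (fun y => decide (0 < PySem.Str.len y))).foldl
            (fun r2 j => r2 ++ [j]) r2)) []
        = r.flatMap (fun i => (pvTok (fun d => '?' == d) [] i.toList).map String.ofList) := by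
    intro r
    have : ∀ (acc : List String), r.foldl (fun r2 i =>
          ((((PySem.Str.split? i (String.ofList ['?'])).getD []).filter (fun y => decide (0 < PySem.Str.len y))).foldl
            (fun r2 j => r2 ++ [j]) r2)) acc
        = acc ++ r.flatMap (fun i => (pvTok (fun d => '?' == d) [] i.toList).map String.ofList) := by
      induction r with
      | nil => intro acc; simp
      | cons x xs ihx =>
        intro acc
        simp only [List.foldl_cons, List.flatMap_cons]
        rw [pv_fold_snoc, pv_pass '?' x, ihx, List.append_assoc]
    simpa using this []
  have pass3 : ∀ (r : List String),
      r.foldl (fun r3 k =>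
          ((((PySem.Str.split? k (String.ofList ['!'])).getD []).filter (fun z => decide (0 < PySem.Str.len z))).foldl
            (fun r3 l => r3 ++ [l]) r3)) []
        = r.flatMap (fun k => (pvTok (fun d => '!' == d) [] k.toList).map String.ofList) := by
    intro r
    have : ∀ (acc : List String), r.foldl (fun r3 k =>
          ((((PySem.Str.split? k (String.ofList ['!'])).getD []).filter (fun z => decide (0 < PySem.Str.len z))).foldl
            (fun r3 l => r3 ++ [l]) r3)) acc
        = acc ++ r.flatMap (fun k => (pvTok (fun d => '!' == d) [] k.toList).map String.ofList) := by
      induction r with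
      | nil => intro acc; simp
      | cons x xs ihx =>
        intro acc
        simp only [List.foldl_cons, List.flatMap_cons]
        rw [pv_fold_snoc, pv_pass '!' x, ihx, List.append_assoc]
    simpa using this []
  rw [pass2, pass3]
  rw [pv_pass_fuse, pv_pass_fuse]
  rw [pv_tok_congr _ (fun ch => ch == '.' || ch == '?' || ch == '!')
      (fun c => by simp [BEq.comm]) review.toList []]
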